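-- pv_equiv track=rewrite | github.com/su-hwani/algorithm_study | 프로그래머스/2/389479. 서버 증설 횟수/서버 증설 횟수.py | solution
-- ===== SOURCE A (Python) =====
-- def solution(players, m, k):
--     created_server = []
--     answer = 0
--
--     for i in range(len(players)):
--         essential_server = players[i] // m
--
--         can_server = 0
--         for q in created_server:
--             if q > i:
--                 can_server += 1
--
--         if essential_server > can_server:
--             essential_server -= can_server
--             answer += essential_server
--             for q in range(essential_server):
--                 created_server.append(i+k)
--
--     return answer
-- ===== SOURCE B (Python) =====
-- def solution(players, m, k):
--     # Expiry queue of (expiry_hour, servers_added): cost per hour is O(1)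
--     # amortized in the number of scale-up events, independent of how many
--     # individual servers each event launches.
--     queue = []      # (expiry hour, servers), expiries nondecreasing
--     active = 0
--     answer = 0
--     for i, p in enumerate(players):
--         while queue and queue[0][0] <= i:
--             active -= queue.pop(0)[1]
--         need = p // m - active
--         if need > 0:
--             answer += need
--             active += need
--             queue.append((i + k, need))
--     return answer
-- ===== Notes on version B (the rewrite author's own statement) =====
-- stated objective: faster
-- what changed: A rescans the whole list of individually-appended created servers every hour; B keeps a queue of (expiry hour, servers added) pairs and an incrementally maintained active count, popping expired entries as hours advance, so per-hour cost no longer depends on how many servers exist.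
import Mathlib
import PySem

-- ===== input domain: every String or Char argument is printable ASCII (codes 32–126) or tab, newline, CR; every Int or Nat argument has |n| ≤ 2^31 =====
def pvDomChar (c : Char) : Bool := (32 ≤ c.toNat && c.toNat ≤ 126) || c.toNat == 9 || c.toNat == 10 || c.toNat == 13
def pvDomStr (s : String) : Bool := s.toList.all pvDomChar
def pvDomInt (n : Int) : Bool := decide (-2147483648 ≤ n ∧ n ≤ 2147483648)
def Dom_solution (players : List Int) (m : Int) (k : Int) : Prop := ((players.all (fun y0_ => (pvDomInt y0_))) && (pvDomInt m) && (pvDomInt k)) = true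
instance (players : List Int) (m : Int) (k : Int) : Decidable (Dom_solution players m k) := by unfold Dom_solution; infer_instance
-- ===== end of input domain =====

-- B replaces A's per-hour scan over every individual created server with an
-- expiry queue of (hour, count) pairs and an incrementally maintained active
-- count (objective: faster; cost no longer scales with the number of servers).

-- ===== PORT A =====
-- can_server: the inner 'for q in created_server: if q > i: can_server += 1'
def countGt (created : List Int) (i : Int) : Int :=
  created.foldl (fun acc q => if q > i then acc + 1 else acc) 0

-- 'for q in range(essential_server): created_server.append(i+k)'
def appendServers (created : List Int) (cnt : Int) (e : Int) : List Int :=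
  (PySem.List.pyRange 0 cnt 1).foldl (fun l _ => l ++ [e]) created

-- 'for i in range(len(players)): …'
def aLoop (players : List Int) (m k : Int) (i : Nat) (created : List Int) (answer : Int) : Int :=
  if h : i < players.length then
    let ess := PySem.Int.floordiv players[i] m
    let can := countGt created (i : Int)
    if ess > can then
      aLoop players m k (i + 1) (appendServers created (ess - can) ((i : Int) + k)) (answer + (ess - can))
    else
      aLoop players m k (i + 1) created answer
  else answer
termination_by players.length - i

def solution (players : List Int) (m : Int) (k : Int) : Int :=
  aLoop players m k 0 [] 0

-- ===== PORT B =====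
-- 'while queue and queue[0][0] <= i: active -= queue.pop(0)[1]'
def popExpired (queue : List (Int × Int)) (i : Int) (active : Int) : List (Int × Int) × Int :=
  match queue with
  | [] => ([], active)
  | (e, c) :: rest => if e ≤ i then popExpired rest i (active - c) else ((e, c) :: rest, active)

-- 'for i, p in enumerate(players): …'
def bLoop (m k : Int) : List Int → Int → List (Int × Int) → Int → Int → Int
  | [], _, _, _, answer => answer
  | p :: rest, i, queue, active, answer =>
    let s := popExpired queue i active
    let need := PySem.Int.floordiv p m - s.2
    if need > 0 then
      bLoop m k rest (i + 1) (s.1 ++ [(i + k, need)]) (s.2 + need) (answer + need)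
    else
      bLoop m k rest (i + 1) s.1 s.2 answer

def solution_alt (players : List Int) (m : Int) (k : Int) : Int :=
  bLoop m k players 0 [] 0 0

-- ===== PRECONDITION & SPEC =====
-- Pre_ excludes only m = 0 with a nonempty players list, on which Python's '//' raises ZeroDivisionError (in both A and B).
def Pre_solution (players : List Int) (m : Int) (k : Int) : Prop := players = [] ∨ m ≠ 0
instance (players : List Int) (m : Int) (k : Int) : Decidable (Pre_solution players m k) := by unfold Pre_solution; infer_instance
def pvWitness_solution : List Int × Int × Int := ([3, 2, 5], 1, 2)

def Spec_solution (players : List Int) (m : Int) (k : Int) (out : Int) : Prop := out = solution_alt players m k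
instance (players : List Int) (m : Int) (k : Int) (out : Int) : Decidable (Spec_solution players m k out) := by unfold Spec_solution; infer_instance

-- ===== CLAIM (what is proved, stated in full; the proofs are below) =====
def Claim_equal_solution : Prop := ∀ (players : List Int) (m : Int) (k : Int), Dom_solution players m k → Pre_solution players m k → Spec_solution players m k (solution players m k)

-- ===== LEMMAS AND PROOFS =====

-- sum of the counts of queue entries whose expiry is strictly past t
def sumGt (queue : List (Int × Int)) (t : Int) : Int :=
  (queue.map (fun p => if p.1 > t then p.2 else 0)).sum

-- total count carried by the queue
def sumAll (queue : List (Int × Int)) : Int := (queue.map Prod.snd).sum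

lemma countGt_snoc (l : List Int) (e i : Int) :
    countGt (l ++ [e]) i = countGt l i + (if e > i then 1 else 0) := by
  simp only [countGt, List.foldl_append, List.foldl_cons, List.foldl_nil]
  split <;> simp

lemma countGt_append (created : List Int) (i : Int) (n : Nat) (e : Int) :
    countGt (created ++ List.replicate n e) i = countGt created i + (if e > i then (n : Int) else 0) := by
  induction n with
  | zero => simp only [List.replicate_zero, List.append_nil, Nat.cast_zero]; split <;> simp
  | succ j ih =>
    have : created ++ List.replicate (j + 1) e = (created ++ List.replicate j e) ++ [e] := by
      simp [List.replicate_succ']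
    rw [this, countGt_snoc, ih]
    split <;> push_cast <;> ring

lemma appendServers_eq (created : List Int) (cnt e : Int) :
    appendServers created cnt e = created ++ List.replicate cnt.toNat e := by
  unfold appendServers
  rw [PySem.List.foldl_append_singleton_eq_map, List.map_const']
  congr 1
  simp [PySem.List.pyRange]
  omega

lemma popExpired_spec (queue : List (Int × Int)) (i : Int) :
    popExpired queue i (sumAll queue) =
      (queue.dropWhile (fun p => p.1 ≤ i), sumAll (queue.dropWhile (fun p => p.1 ≤ i))) := by
  induction queue with
  | nil => rfl
  | cons p rest ih =>
    obtain ⟨e, c⟩ := p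
    by_cases h : e ≤ i
    · have hs : sumAll ((e, c) :: rest) - c = sumAll rest := by simp [sumAll]
      simp only [popExpired, List.dropWhile_cons, decide_eq_true_eq, h, ite_true, hs, ih]
    · simp [popExpired, h]

lemma sumGt_dropWhile (queue : List (Int × Int)) (i t : Int) (hit : i ≤ t) :
    sumGt (queue.dropWhile (fun p => p.1 ≤ i)) t = sumGt queue t := by
  induction queue with
  | nil => rfl
  | cons p rest ih =>
    by_cases h : p.1 ≤ i
    · rw [List.dropWhile_cons, if_pos (by simpa using h), ih]
      have hnt : ¬ p.1 > t := by omega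
      simp [sumGt, hnt]
    · rw [List.dropWhile_cons, if_neg (by simpa using h)]

lemma sumAll_eq_sumGt (queue : List (Int × Int)) (i : Int)
    (h : ∀ p ∈ queue, i < p.1) : sumAll queue = sumGt queue i := by
  induction queue with
  | nil => rfl
  | cons p rest ih =>
    have hp := h p (by simp)
    simp only [sumAll, sumGt, List.map_cons, List.sum_cons, if_pos hp] at *
    rw [ih (fun q hq => h q (by simp [hq]))]

lemma mem_dropWhile_gt (queue : List (Int × Int)) (i : Int)
    (hpair : List.Pairwise (· ≤ ·) (queue.map Prod.fst)) :
    ∀ p ∈ queue.dropWhile (fun p => p.1 ≤ i), i < p.1 := by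
  induction queue with
  | nil => simp
  | cons p rest ih =>
    rw [List.map_cons, List.pairwise_cons] at hpair
    by_cases h : p.1 ≤ i
    · rw [List.dropWhile_cons, if_pos (by simpa using h)]
      exact ih hpair.2
    · rw [List.dropWhile_cons, if_neg (by simpa using h)]
      intro q hq
      rcases List.mem_cons.mp hq with rfl | hmem
      · omega
      · have := hpair.1 q.1 (List.mem_map_of_mem hmem)
        omega

lemma loop_eq (m k : Int) (players : List Int) :
    ∀ (rest : List Int) (i : Nat) (created : List Int) (queue : List (Int × Int)) (answer : Int),
      rest = players.drop i →
      (∀ t : Int, (i : Int) ≤ t → countGt created t = sumGt queue t) →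
      List.Pairwise (· ≤ ·) (queue.map Prod.fst) →
      (∀ p ∈ queue, p.1 < (i : Int) + k) →
      aLoop players m k i created answer = bLoop m k rest (i : Int) queue (sumAll queue) answer := by
  intro rest
  induction rest with
  | nil =>
    intro i created queue answer hrest _ _ _
    have hlen : players.length ≤ i := by
      have := congrArg List.length hrest; simp at this; omega
    rw [aLoop, dif_neg (by omega)]
    rfl
  | cons p rest' ih =>
    intro i created queue answer hrest hcnt hpair hbound
    have hi : i < players.length := by
      have := congrArg List.length hrest; simp at this; omega
    rw [List.drop_eq_getElem_cons hi] at hrest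
    injection hrest with hp hrest'
    subst hp
    set Q' := queue.dropWhile (fun p => p.1 ≤ (i : Int)) with hQ'
    have hpop := popExpired_spec queue (i : Int)
    have hmem := mem_dropWhile_gt queue (i : Int) hpair
    have hsub : List.Sublist Q' queue := List.dropWhile_sublist _
    have hact : sumAll Q' = countGt created (i : Int) := by
      rw [sumAll_eq_sumGt _ _ hmem, sumGt_dropWhile _ _ _ le_rfl, ← hcnt (i : Int) le_rfl]
    rw [aLoop]
    simp only [dif_pos hi, bLoop, hpop, ← hQ', hact]
    by_cases hd : countGt created (i : Int) < PySem.Int.floordiv players[i] m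
    · rw [if_pos hd, if_pos (by omega)]
      set d := PySem.Int.floordiv players[i] m - countGt created (i : Int) with hdd
      have hd0 : (0 : Int) < d := by omega
      have hcast : ((i + 1 : Nat) : Int) = (i : Int) + 1 := by push_cast; ring
      have hcnt' : ∀ t : Int, ((i + 1 : Nat) : Int) ≤ t →
          countGt (appendServers created d ((i : Int) + k)) t = sumGt (Q' ++ [((i : Int) + k, d)]) t := by
        intro t ht
        rw [hcast] at ht
        rw [appendServers_eq, countGt_append]
        have htoNat : ((d.toNat : Int)) = d := by omega
        rw [htoNat]
        have h1 : sumGt (Q' ++ [((i : Int) + k, d)]) t = sumGt Q' t + (if (i : Int) + k > t then d else 0) := by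
          simp [sumGt]
        rw [h1, hQ', sumGt_dropWhile _ _ _ (by omega), hcnt t (by omega)]
      have hpair' : List.Pairwise (· ≤ ·) ((Q' ++ [((i : Int) + k, d)]).map Prod.fst) := by
        rw [List.map_append, List.pairwise_append]
        refine ⟨List.Pairwise.sublist (hsub.map Prod.fst) hpair, by simp, ?_⟩
        intro x hx y hy
        simp only [List.map_cons, List.map_nil, List.mem_cons, List.not_mem_nil, or_false] at hy
        subst hy
        obtain ⟨q, hq, rfl⟩ := List.mem_map.mp hx
        have := hbound q (hsub.subset hq)
        omega
      have hbound' : ∀ p ∈ Q' ++ [((i : Int) + k, d)], p.1 < ((i + 1 : Nat) : Int) + k := by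
        intro q hq
        rw [hcast]
        rcases List.mem_append.mp hq with hq | hq
        · have := hbound q (hsub.subset hq); omega
        · obtain rfl := List.mem_singleton.mp hq
          simp
      have hsum : sumAll (Q' ++ [((i : Int) + k, d)]) = countGt created (i : Int) + d := by
        simp [sumAll, ← hact]
      have := ih (i + 1) (appendServers created d ((i : Int) + k)) (Q' ++ [((i : Int) + k, d)])
        (answer + d) hrest' hcnt' hpair' hbound'
      rw [hsum, hcast] at this
      exact this
    · rw [if_neg hd, if_neg (by omega)]
      have hcast : ((i + 1 : Nat) : Int) = (i : Int) + 1 := by push_cast; ring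
      have hcnt' : ∀ t : Int, ((i + 1 : Nat) : Int) ≤ t → countGt created t = sumGt Q' t := by
        intro t ht
        rw [hcast] at ht
        rw [hQ', sumGt_dropWhile _ _ _ (by omega), hcnt t (by omega)]
      have hpair' : List.Pairwise (· ≤ ·) (Q'.map Prod.fst) :=
        List.Pairwise.sublist (hsub.map Prod.fst) hpair
      have hbound' : ∀ p ∈ Q', p.1 < ((i + 1 : Nat) : Int) + k := by
        intro q hq
        rw [hcast]
        have := hbound q (hsub.subset hq); omega
      have := ih (i + 1) created Q' answer hrest' hcnt' hpair' hbound'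
      rw [hcast, hact] at this
      exact this

-- ===== VERDICT (by name: the statement is the Claim_ definition above) =====
theorem solution_spec : Claim_equal_solution := by
  intro players m k _ _
  unfold Spec_solution solution solution_alt
  have h := loop_eq m k players players 0 [] [] 0 (by simp) (by intro t _; rfl) (by simp) (by simp)
  simpa [sumAll] using h
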